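-- pv_equiv track=rewrite | github.com/mahdi-sahami/phonebook | contacts/selectors.py | apply_contact_filters
-- ===== SOURCE A (Python) =====
-- from typing import Any
--
-- def apply_contact_filters(contacts: list[dict[str, Any]], filters: dict[str, str]) -> list[dict[str, Any]]:
--     """
--     I apply search and advanced filters to the contact collection already
--     returned by my API.
--     """
--     q: str = (filters.get("q") or "").strip().lower()
--     email: str = (filters.get("email") or "").strip().lower()
--     address: str = (filters.get("address") or "").strip().lower()
--     ordering: str = (filters.get("ordering") or "name").strip()
--
--     filtered: list[dict[str, Any]] = contacts
--
--     if q: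
--         filtered = [
--             contact
--             for contact in filtered
--             if q in str(contact.get("name", "")).lower()
--             or q in str(contact.get("phone", "")).lower()
--             or q in str(contact.get("email", "")).lower()
--             or q in str(contact.get("address", "")).lower()
--         ]
--
--     if email:
--         filtered = [
--             contact for contact in filtered if email in str(contact.get("email", "")).lower()
--         ]
--
--     if address:
--         filtered = [
--             contact for contact in filtered if address in str(contact.get("address", "")).lower()
--         ]
--
--     reverse: bool = ordering.startswith("-")
--     field_name: str = ordering.lstrip("-")
--
--     filtered.sort(key=lambda item: str(item.get(field_name, "")).lower(), reverse=reverse)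
--     return filtered
-- ===== SOURCE B (Python) =====
-- def apply_contact_filters(contacts, filters):
--     def norm(key):
--         return (filters.get(key) or "").strip().lower()
--
--     # Build a data-driven list of active conditions: (needle, fields to search).
--     conditions = []
--     q = norm("q")
--     if q:
--         conditions.append((q, ["name", "phone", "email", "address"]))
--     for key in ["email", "address"]:
--         needle = norm(key)
--         if needle:
--             conditions.append((needle, [key]))
--
--     result = [
--         c for c in contacts
--         if all(any(needle in str(c.get(f, "")).lower() for f in fields)
--                for needle, fields in conditions)
--     ]
--
--     ordering = (filters.get("ordering") or "name").strip()
--     field = ordering.lstrip("-")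
--     result.sort(key=lambda c: str(c.get(field, "")).lower(),
--                 reverse=ordering.startswith("-"))
--     return result
-- ===== Notes on version B (the rewrite author's own statement) =====
-- stated objective: alternative
-- what changed: A applies up to three sequential filtering passes over the list; B first builds a data-driven list of active (needle, fields-to-search) conditions and filters in a single pass keeping contacts satisfying all conditions, then sorts identically; B always returns a fresh list (A sorts the caller's list in place when no filter is active) but the return value is the same.
import Mathlib
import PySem

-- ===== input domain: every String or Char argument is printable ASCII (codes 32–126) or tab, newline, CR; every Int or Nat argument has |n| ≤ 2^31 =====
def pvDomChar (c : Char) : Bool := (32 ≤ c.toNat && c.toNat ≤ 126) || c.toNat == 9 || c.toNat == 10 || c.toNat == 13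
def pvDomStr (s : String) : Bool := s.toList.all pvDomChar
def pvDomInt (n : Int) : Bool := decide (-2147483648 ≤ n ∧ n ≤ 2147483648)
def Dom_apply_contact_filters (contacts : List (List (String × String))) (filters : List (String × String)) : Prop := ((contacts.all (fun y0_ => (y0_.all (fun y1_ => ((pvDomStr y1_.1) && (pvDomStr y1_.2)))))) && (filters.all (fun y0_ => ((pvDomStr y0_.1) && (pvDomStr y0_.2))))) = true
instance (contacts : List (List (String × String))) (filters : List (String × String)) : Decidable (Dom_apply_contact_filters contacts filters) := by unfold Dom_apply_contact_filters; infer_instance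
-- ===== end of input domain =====

-- B replaces A's three staged filtering passes by a data-driven single pass: it first builds a
-- list of active (needle, fields-to-search) conditions and then keeps the contacts satisfying
-- all of them; same normalization and final sort. A sorts the caller's list in place when no
-- filter is active while B always returns a fresh list: the equivalence proved here is about
-- the RETURN value only.

-- ===== PORT A =====

-- str(contact.get(k, "")).lower() — values are strings, so str() is the identity
def pvGetLow (contact : List (String × String)) (k : String) : String :=
  PySem.Str.lower ((PySem.Dict.ofList contact).getD k "")

-- (filters.get(k) or dflt): None and "" are both falsy
def pvGetOr (filters : List (String × String)) (k dflt : String) : String :=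
  let v := ((PySem.Dict.ofList filters).get? k).getD ""
  if v == "" then dflt else v

-- s.lstrip("-") : drop leading '-' characters (hand port, exact: lstrip removes only that leading run)
def pvLstripDash (s : String) : String :=
  String.ofList (s.toList.dropWhile (· == '-'))

def apply_contact_filters (contacts : List (List (String × String))) (filters : List (String × String)) : List (List (String × String)) :=
  let q := PySem.Str.lower (PySem.Str.strip (pvGetOr filters "q" ""))
  let email := PySem.Str.lower (PySem.Str.strip (pvGetOr filters "email" ""))
  let address := PySem.Str.lower (PySem.Str.strip (pvGetOr filters "address" ""))
  let ordering := PySem.Str.strip (pvGetOr filters "ordering" "name")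
  let filtered := contacts
  let filtered := if q == "" then filtered else
    filtered.filter (fun contact =>
      PySem.Str.isIn q (pvGetLow contact "name") ||
      PySem.Str.isIn q (pvGetLow contact "phone") ||
      PySem.Str.isIn q (pvGetLow contact "email") ||
      PySem.Str.isIn q (pvGetLow contact "address"))
  let filtered := if email == "" then filtered else
    filtered.filter (fun contact => PySem.Str.isIn email (pvGetLow contact "email"))
  let filtered := if address == "" then filtered else
    filtered.filter (fun contact => PySem.Str.isIn address (pvGetLow contact "address"))
  let reverse := PySem.Str.startswith ordering "-"
  let field_name := pvLstripDash ordering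
  PySem.List.sorted filtered (fun item => pvGetLow item field_name) reverse

-- ===== PORT B =====

-- norm(key) = (filters.get(key) or "").strip().lower()
def pvbNorm (filters : List (String × String)) (key : String) : String :=
  PySem.Str.lower (PySem.Str.strip (((PySem.Dict.ofList filters).get? key).getD ""))

-- the active (needle, fields) conditions, built exactly as the Python does
def pvbConds (filters : List (String × String)) : List (String × List String) :=
  let conditions : List (String × List String) := []
  let q := pvbNorm filters "q"
  let conditions := if q == "" then conditions
    else conditions ++ [(q, ["name", "phone", "email", "address"])]
  ["email", "address"].foldl (fun acc key =>
    let needle := pvbNorm filters key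
    if needle == "" then acc else acc ++ [(needle, [key])]) conditions

-- all(any(needle in str(c.get(f, "")).lower() for f in fields) for needle, fields in conditions)
def pvbMatches (conds : List (String × List String)) (c : List (String × String)) : Bool :=
  conds.all (fun cond =>
    cond.2.any (fun f =>
      PySem.Str.isIn cond.1 (PySem.Str.lower ((PySem.Dict.ofList c).getD f ""))))

def apply_contact_filters_alt (contacts : List (List (String × String))) (filters : List (String × String)) : List (List (String × String)) :=
  let result := contacts.filter (pvbMatches (pvbConds filters))
  let ov := ((PySem.Dict.ofList filters).get? "ordering").getD ""
  let ordering := PySem.Str.strip (if ov == "" then "name" else ov)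
  let field := String.ofList (ordering.toList.dropWhile (· == '-'))
  PySem.List.sorted result
    (fun c => PySem.Str.lower ((PySem.Dict.ofList c).getD field ""))
    (PySem.Str.startswith ordering "-")

-- ===== PRECONDITION & SPEC =====
def Spec_apply_contact_filters (contacts : List (List (String × String))) (filters : List (String × String)) (out : List (List (String × String))) : Prop := out = apply_contact_filters_alt contacts filters
instance (contacts : List (List (String × String))) (filters : List (String × String)) (out : List (List (String × String))) : Decidable (Spec_apply_contact_filters contacts filters out) := by unfold Spec_apply_contact_filters; infer_instance

-- ===== CLAIM (what is proved, stated in full; the proofs are below) =====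
def Claim_equal_apply_contact_filters : Prop := ∀ (contacts : List (List (String × String))) (filters : List (String × String)), Dom_apply_contact_filters contacts filters → Spec_apply_contact_filters contacts filters (apply_contact_filters contacts filters)

-- ===== LEMMAS AND PROOFS =====

-- `(filters.get(k) or "")` is just the lookup with default ""
theorem pvGetOr_empty (filters : List (String × String)) (k : String) :
    pvGetOr filters k "" = ((PySem.Dict.ofList filters).get? k).getD "" := by
  by_cases h : ((PySem.Dict.ofList filters).get? k).getD "" = ""
  · simp [pvGetOr, h]
  · simp [pvGetOr, h]

-- ===== VERDICT (by name: the statement is the Claim_ definition above) =====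
theorem apply_contact_filters_spec : Claim_equal_apply_contact_filters := by
  intro contacts filters _
  unfold Spec_apply_contact_filters apply_contact_filters apply_contact_filters_alt
  unfold pvbConds pvbMatches pvbNorm pvGetLow pvLstripDash
  rw [pvGetOr_empty, pvGetOr_empty, pvGetOr_empty]
  unfold pvGetOr
  by_cases hq : PySem.Str.lower (PySem.Str.strip (((PySem.Dict.ofList filters).get? "q").getD "")) = "" <;>
  by_cases he : PySem.Str.lower (PySem.Str.strip (((PySem.Dict.ofList filters).get? "email").getD "")) = "" <;>
  by_cases ha : PySem.Str.lower (PySem.Str.strip (((PySem.Dict.ofList filters).get? "address").getD "")) = "" <;>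
    simp [hq, he, ha, List.filter_filter, List.filter_true, Bool.or_assoc, Bool.and_comm, Bool.and_assoc]
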